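-- pv_equiv track=rewrite | github.com/dcjthecoder/alpaca-backtrader-api | momentum/alpacapaper.py | is_us_stock
-- ===== SOURCE A (Python) =====
-- def is_us_stock(sym: str) -> bool:
--     foreign_suffixes = [
--         ".AR", ".AT", ".AU", ".BE", ".BR", ".CA", ".CH", ".CL", ".CN", ".CZ",
--         ".DE", ".DK", ".EE", ".EG", ".ES", ".FI", ".FR", ".GB", ".GR", ".HK",
--         ".HU", ".ID", ".IE", ".IL", ".IN", ".IS", ".IT", ".JP", ".KR", ".KW",
--         ".LK", ".LT", ".LV", ".MX", ".MY", ".NL", ".NO", ".NZ", ".PE", ".PH",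
--         ".PK", ".PL", ".PT", ".QA", ".RO", ".RU", ".SA", ".SE", ".SG", ".SR",
--         ".TH", ".TR", ".TW", ".VE", ".VN", ".ZA", ".OL", ".PA", ".TO", ".BK",
--         ".L", ".F", ".V", ".NS", ".T", ".SR", ".CR"
--     ]
--     sym_up = sym.upper()
--     return not any(sym_up.endswith(suf) for suf in foreign_suffixes)
-- ===== SOURCE B (Python) =====
-- # Single backward scan: find the last dot within the final 3 chars and test the
-- # bare extension against a set, instead of trying all 67 ".XX" suffixes.
-- _FOREIGN_EXTS = frozenset({
--     "AR", "AT", "AU", "BE", "BR", "CA", "CH", "CL", "CN", "CZ",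
--     "DE", "DK", "EE", "EG", "ES", "FI", "FR", "GB", "GR", "HK",
--     "HU", "ID", "IE", "IL", "IN", "IS", "IT", "JP", "KR", "KW",
--     "LK", "LT", "LV", "MX", "MY", "NL", "NO", "NZ", "PE", "PH",
--     "PK", "PL", "PT", "QA", "RO", "RU", "SA", "SE", "SG", "SR",
--     "TH", "TR", "TW", "VE", "VN", "ZA", "OL", "PA", "TO", "BK",
--     "L", "F", "V", "NS", "T", "CR"
-- })
--
--
-- def is_us_stock(sym: str) -> bool:
--     sym_up = sym.upper()
--     token = ""
--     for ch in reversed(sym_up):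
--         if ch == '.':
--             return token not in _FOREIGN_EXTS
--         if len(token) >= 2:
--             # every foreign extension has at most 2 letters
--             return True
--         token = ch + token
--     return True
-- ===== Notes on version B (the rewrite author's own statement) =====
-- stated objective: alternative
-- what changed: Instead of testing the symbol against all 67 foreign suffixes with endswith, B scans at most 3 characters backward from the end to extract the token after the last dot and checks it against a precomputed set of bare extensions.
import Mathlib
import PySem

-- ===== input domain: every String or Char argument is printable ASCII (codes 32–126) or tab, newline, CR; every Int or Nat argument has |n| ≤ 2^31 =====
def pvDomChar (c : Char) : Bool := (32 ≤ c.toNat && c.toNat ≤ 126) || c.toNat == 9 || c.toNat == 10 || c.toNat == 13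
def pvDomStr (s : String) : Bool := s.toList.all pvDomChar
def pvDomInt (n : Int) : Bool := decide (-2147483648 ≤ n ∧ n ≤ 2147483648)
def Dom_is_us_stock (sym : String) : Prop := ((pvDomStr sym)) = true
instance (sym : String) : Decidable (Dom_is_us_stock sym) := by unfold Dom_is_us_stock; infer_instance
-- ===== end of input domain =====

-- B replaces A's 67 endswith tests by one backward scan of at most 3 characters
-- plus a set lookup of the bare extension (alternative algorithm, same overall cost).
set_option maxRecDepth 100000


-- ===== PORT A =====
def foreignSuffixes : List String := [
  ".AR", ".AT", ".AU", ".BE", ".BR", ".CA", ".CH", ".CL", ".CN", ".CZ",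
  ".DE", ".DK", ".EE", ".EG", ".ES", ".FI", ".FR", ".GB", ".GR", ".HK",
  ".HU", ".ID", ".IE", ".IL", ".IN", ".IS", ".IT", ".JP", ".KR", ".KW",
  ".LK", ".LT", ".LV", ".MX", ".MY", ".NL", ".NO", ".NZ", ".PE", ".PH",
  ".PK", ".PL", ".PT", ".QA", ".RO", ".RU", ".SA", ".SE", ".SG", ".SR",
  ".TH", ".TR", ".TW", ".VE", ".VN", ".ZA", ".OL", ".PA", ".TO", ".BK",
  ".L", ".F", ".V", ".NS", ".T", ".SR", ".CR"]

def is_us_stock (sym : String) : Bool :=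
  let sym_up := PySem.Str.upper sym
  !(foreignSuffixes.any (fun suf => PySem.Str.endswith sym_up suf))

-- ===== PORT B =====
-- the frozenset _FOREIGN_EXTS of Source B (membership only, so a list of its elements)
def foreignExts : List (List Char) := [
  ['A','R'], ['A','T'], ['A','U'], ['B','E'], ['B','R'], ['C','A'], ['C','H'], ['C','L'], ['C','N'], ['C','Z'],
  ['D','E'], ['D','K'], ['E','E'], ['E','G'], ['E','S'], ['F','I'], ['F','R'], ['G','B'], ['G','R'], ['H','K'],
  ['H','U'], ['I','D'], ['I','E'], ['I','L'], ['I','N'], ['I','S'], ['I','T'], ['J','P'], ['K','R'], ['K','W'],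
  ['L','K'], ['L','T'], ['L','V'], ['M','X'], ['M','Y'], ['N','L'], ['N','O'], ['N','Z'], ['P','E'], ['P','H'],
  ['P','K'], ['P','L'], ['P','T'], ['Q','A'], ['R','O'], ['R','U'], ['S','A'], ['S','E'], ['S','G'], ['S','R'],
  ['T','H'], ['T','R'], ['T','W'], ['V','E'], ['V','N'], ['Z','A'], ['O','L'], ['P','A'], ['T','O'], ['B','K'],
  ['L'], ['F'], ['V'], ['N','S'], ['T'], ['C','R']]

-- the backward scan of Source B: ch runs over reversed(sym_up), token is the tail collected so far
def altLoop : List Char → List Char → Bool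
  | [], _ => true
  | ch :: rest, token =>
    if ch = '.' then !(decide (token ∈ foreignExts))
    else if 2 ≤ token.length then true
    else altLoop rest (ch :: token)

def is_us_stock_alt (sym : String) : Bool :=
  let sym_up := PySem.Str.upper sym
  altLoop sym_up.toList.reverse []

-- ===== PRECONDITION & SPEC =====
def Spec_is_us_stock (sym : String) (out : Bool) : Prop := out = is_us_stock_alt sym
instance (sym : String) (out : Bool) : Decidable (Spec_is_us_stock sym out) := by unfold Spec_is_us_stock; infer_instance

-- ===== CLAIM (what is proved, stated in full; the proofs are below) =====
def Claim_equal_is_us_stock : Prop := ∀ (sym : String), Dom_is_us_stock sym → Spec_is_us_stock sym (is_us_stock sym)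

-- ===== LEMMAS AND PROOFS =====

-- A's suffix list is exactly '.' prepended to each bare extension (".SR" listed twice)
def extsDup : List (List Char) := foreignSuffixes.map (fun s => s.toList.drop 1)

theorem suffixes_eq_dot_exts :
    foreignSuffixes.map String.toList = extsDup.map (List.cons '.') := by decide

theorem dedup_extsDup : PySem.List.dedup extsDup = foreignExts := by decide

theorem mem_extsDup_iff (x : List Char) : x ∈ extsDup ↔ x ∈ foreignExts := by
  rw [← dedup_extsDup, PySem.List.mem_dedup]

theorem exts_facts : ∀ e ∈ foreignExts, (e.length = 1 ∨ e.length = 2) ∧ '.' ∉ e := by decide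

-- shape of each set element: [x] or [x, y] with letters ≠ '.'
theorem exts_shape : ∀ e ∈ foreignExts,
    (∃ x, e = [x] ∧ x ≠ '.') ∨ (∃ x y, e = [x, y] ∧ x ≠ '.' ∧ y ≠ '.') := by
  intro e he
  obtain ⟨hl, hd⟩ := exts_facts e he
  rcases hl with h1 | h2
  · left
    match e, h1 with
    | [x], _ =>
      simp only [List.mem_singleton] at hd
      exact ⟨x, rfl, fun h => hd h.symm⟩
  · right
    match e, h2 with
    | [x, y], _ =>
      simp only [List.mem_cons, not_or] at hd
      exact ⟨x, y, rfl, fun h => hd.1 h.symm, fun h => hd.2.1 h.symm⟩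

theorem endswith_rev_iff (r p : List Char) :
    PySem.Chars.endswith r.reverse p = true ↔ p.reverse <+: r := by
  rw [PySem.Chars.endswith_iff]
  constructor
  · intro h; simpa using List.reverse_prefix.mpr h
  · intro h; simpa using List.reverse_suffix.mpr h

-- the heart: the backward scan computes the negation of "some foreign suffix matches"
theorem altLoop_eq (r : List Char) :
    altLoop r [] = !(foreignExts.any (fun e => PySem.Chars.endswith r.reverse ('.' :: e))) := by
  have key : ∀ (e : List Char),
      PySem.Chars.endswith r.reverse ('.' :: e) = decide (e.reverse ++ ['.'] <+: r) := by
    intro e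
    rw [Bool.eq_iff_iff, decide_eq_true_iff, endswith_rev_iff]
    simp
  rw [List.any_congr rfl key]
  clear key
  match r with
  | [] =>
    rw [show (foreignExts.any fun e => decide (e.reverse ++ ['.'] <+: ([] : List Char))) = false from
      List.any_eq_false.mpr (by intro e _; simp)]
    rfl
  | a :: r' =>
    by_cases ha : a = '.'
    · subst ha
      rw [show (foreignExts.any fun e => decide (e.reverse ++ ['.'] <+: '.' :: r')) = false from
        List.any_eq_false.mpr ?_]
      · simp only [altLoop]
        rw [show (decide (([] : List Char) ∈ foreignExts)) = false from by decide]
        rfl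
      · intro e he
        rcases exts_shape e he with ⟨x, rfl, hx⟩ | ⟨x, y, rfl, hx, hy⟩ <;>
          simp [List.cons_prefix_iff] <;> intro h <;> exact absurd h.symm (by assumption)
    · match r' with
      | [] =>
        rw [show (foreignExts.any fun e => decide (e.reverse ++ ['.'] <+: [a])) = false from
          List.any_eq_false.mpr ?_]
        · simp [altLoop, ha]
        · intro e he
          rcases exts_shape e he with ⟨x, rfl, hx⟩ | ⟨x, y, rfl, hx, hy⟩ <;>
            simp [List.cons_prefix_iff]
      | b :: r'' =>
        by_cases hb : b = '.'
        · subst hb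
          rw [show (foreignExts.any fun e => decide (e.reverse ++ ['.'] <+: a :: '.' :: r'')) =
              decide ([a] ∈ foreignExts) from ?_]
          · simp [altLoop, ha]
          · rw [Bool.eq_iff_iff, List.any_eq_true, decide_eq_true_iff]
            constructor
            · rintro ⟨e, he, hpre⟩
              rw [decide_eq_true_iff] at hpre
              rcases exts_shape e he with ⟨x, rfl, hx⟩ | ⟨x, y, rfl, hx, hy⟩
              · simp [List.cons_prefix_iff] at hpre
                rw [hpre]; exact he
              · simp [List.cons_prefix_iff] at hpre
                exact absurd hpre.2.1.symm hx
            · intro h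
              exact ⟨[a], h, by simp [List.cons_prefix_iff]⟩
        · match r'' with
          | [] =>
            rw [show (foreignExts.any fun e => decide (e.reverse ++ ['.'] <+: [a, b])) = false from
              List.any_eq_false.mpr ?_]
            · simp [altLoop, ha, hb]
            · intro e he
              rcases exts_shape e he with ⟨x, rfl, hx⟩ | ⟨x, y, rfl, hx, hy⟩ <;>
                simp [List.cons_prefix_iff]
              intro h h2; exact absurd h2 hb
          | c :: r''' =>
            by_cases hc : c = '.'
            · subst hc
              rw [show (foreignExts.any fun e => decide (e.reverse ++ ['.'] <+: a :: b :: '.' :: r''')) =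
                  decide ([b, a] ∈ foreignExts) from ?_]
              · simp [altLoop, ha, hb]
              · rw [Bool.eq_iff_iff, List.any_eq_true, decide_eq_true_iff]
                constructor
                · rintro ⟨e, he, hpre⟩
                  rw [decide_eq_true_iff] at hpre
                  rcases exts_shape e he with ⟨x, rfl, hx⟩ | ⟨x, y, rfl, hx, hy⟩
                  · simp [List.cons_prefix_iff] at hpre
                    exact absurd hpre.2 hb
                  · simp [List.cons_prefix_iff] at hpre
                    rw [hpre.1, hpre.2]; exact he
                · intro h
                  exact ⟨[b, a], h, by simp [List.cons_prefix_iff]⟩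
            · rw [show (foreignExts.any fun e => decide (e.reverse ++ ['.'] <+: a :: b :: c :: r''')) = false from
                List.any_eq_false.mpr ?_]
              · simp [altLoop, ha, hb, hc]
              · intro e he
                rcases exts_shape e he with ⟨x, rfl, hx⟩ | ⟨x, y, rfl, hx, hy⟩ <;>
                  simp [List.cons_prefix_iff] <;> intro h
                · exact fun h2 => absurd h2 hb
                · exact fun _ h3 => absurd h3 hc

-- bridge: A's any over the 67 suffix strings equals the any over the bare extensions
theorem A_any_eq (u : List Char) :
    (foreignSuffixes.any fun suf => PySem.Chars.endswith u suf.toList)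
      = foreignExts.any (fun e => PySem.Chars.endswith u ('.' :: e)) := by
  rw [Bool.eq_iff_iff, List.any_eq_true, List.any_eq_true]
  constructor
  · rintro ⟨s, hs, h⟩
    have hm : s.toList ∈ extsDup.map (List.cons '.') := by
      rw [← suffixes_eq_dot_exts]; exact List.mem_map_of_mem hs
    rcases List.mem_map.mp hm with ⟨e, he, heq⟩
    exact ⟨e, (mem_extsDup_iff e).mp he, heq ▸ h⟩
  · rintro ⟨e, he, h⟩
    have hm : ('.' :: e) ∈ foreignSuffixes.map String.toList := by
      rw [suffixes_eq_dot_exts]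
      exact List.mem_map_of_mem ((mem_extsDup_iff e).mpr he)
    rcases List.mem_map.mp hm with ⟨s, hs, heq⟩
    exact ⟨s, hs, by rw [heq]; exact h⟩

-- ===== VERDICT (by name: the statement is the Claim_ definition above) =====
theorem is_us_stock_spec : Claim_equal_is_us_stock := by
  intro sym _
  unfold Spec_is_us_stock is_us_stock is_us_stock_alt
  rw [altLoop_eq]
  simp only [List.reverse_reverse, PySem.Str.endswith_eq]
  rw [A_any_eq]
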